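-- pv_equiv track=rewrite | github.com/desplega-ai/chat-py | packages/chat/src/chat/_remend.py | _split_at_fences
-- ===== SOURCE A (Python) =====
-- def _split_at_fences(text: str) -> list[tuple[bool, str]]:
--     """Split *text* into ``[(in_fence, chunk), ...]`` runs."""
--     out: list[tuple[bool, str]] = []
--     in_fence = False
--     buf: list[str] = []
--     for line in text.split("\n"):
--         stripped = line.lstrip()
--         if stripped.startswith("```") or stripped.startswith("~~~"):
--             out.append((in_fence, "\n".join(buf)))
--             buf = [line]
--             in_fence = not in_fence
--             continue
--         buf.append(line)
--     out.append((in_fence, "\n".join(buf)))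
--     return out
-- ===== SOURCE B (Python) =====
-- def _split_at_fences(text: str) -> list[tuple[bool, str]]:
--     """Split *text* into ``[(in_fence, chunk), ...]`` runs."""
--     lines = text.split("\n")
--     bounds = [i for i, line in enumerate(lines)
--               if line.lstrip().startswith("```") or line.lstrip().startswith("~~~")]
--     starts = [0] + bounds
--     ends = bounds + [len(lines)]
--     return [(bool(k % 2), "\n".join(lines[s:e]))
--             for k, (s, e) in enumerate(zip(starts, ends))]
-- ===== Notes on version B (the rewrite author's own statement) =====
-- stated objective: alternative
-- what changed: Replaces the single-pass toggle-and-flush accumulator (mutable in_fence flag and buf list) with two passes: collect the indices of fence lines, then slice the line list between consecutive boundaries and tag each slice by its parity.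
import Mathlib
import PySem

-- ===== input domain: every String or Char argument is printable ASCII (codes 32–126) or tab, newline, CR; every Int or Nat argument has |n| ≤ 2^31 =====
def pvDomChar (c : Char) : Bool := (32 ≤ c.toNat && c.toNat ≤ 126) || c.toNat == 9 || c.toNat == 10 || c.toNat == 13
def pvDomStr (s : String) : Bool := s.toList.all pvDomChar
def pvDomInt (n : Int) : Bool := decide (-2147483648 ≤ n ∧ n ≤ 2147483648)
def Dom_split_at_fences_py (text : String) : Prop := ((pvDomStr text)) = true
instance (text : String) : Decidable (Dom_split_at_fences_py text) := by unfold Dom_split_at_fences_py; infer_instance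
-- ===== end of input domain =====

-- B replaces A's single-pass toggle-and-flush accumulator with a two-pass
-- boundary-index-then-slice decomposition (alternative, same cost).

-- shared helper: line.lstrip().startswith("```") or line.lstrip().startswith("~~~")
def pvFence (line : String) : Bool :=
  let stripped := PySem.Str.lstrip line
  PySem.Str.startswith stripped "```" || PySem.Str.startswith stripped "~~~"

-- ===== PORT A =====
-- the loop over text.split("\n") with state (out, in_fence, buf)
def pvALoop : List String → List (Bool × String) → Bool → List String → List (Bool × String)
  | [], out, in_fence, buf => out ++ [(in_fence, PySem.Str.join "\n" buf)]
  | line :: rest, out, in_fence, buf =>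
    if pvFence line then
      pvALoop rest (out ++ [(in_fence, PySem.Str.join "\n" buf)]) (!in_fence) [line]
    else
      pvALoop rest out in_fence (buf ++ [line])

def split_at_fences_py (text : String) : List (Bool × String) :=
  pvALoop ((PySem.Str.split? text "\n").getD []) [] false []

-- ===== PORT B =====
-- bounds = [i for i, line in enumerate(lines) if <fence test>]
def pvBoundsB (lines : List String) : List Int :=
  (PySem.List.enumerate lines 0).filterMap (fun p => if pvFence p.2 then some p.1 else none)

-- [(bool(k % 2), "\n".join(lines[s:e])) for k, (s, e) in enumerate(zip([0]+bounds, bounds+[len(lines)]))]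
def pvChunksB (lines : List String) : List (Bool × String) :=
  (PySem.List.enumerate
      ((0 :: pvBoundsB lines).zip (pvBoundsB lines ++ [(lines.length : Int)])) 0).map
    (fun q => (PySem.Int.mod q.1 2 == 1,
               PySem.Str.join "\n" (PySem.List.slice lines (some q.2.1) (some q.2.2))))

def split_at_fences_py_alt (text : String) : List (Bool × String) :=
  pvChunksB ((PySem.Str.split? text "\n").getD [])

-- ===== PRECONDITION & SPEC =====
def Spec_split_at_fences_py (text : String) (out : List (Bool × String)) : Prop := out = split_at_fences_py_alt text
instance (text : String) (out : List (Bool × String)) : Decidable (Spec_split_at_fences_py text out) := by unfold Spec_split_at_fences_py; infer_instance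

-- ===== CLAIM (what is proved, stated in full; the proofs are below) =====
def Claim_equal_split_at_fences_py : Prop := ∀ (text : String), Dom_split_at_fences_py text → Spec_split_at_fences_py text (split_at_fences_py text)

-- ===== LEMMAS AND PROOFS =====

-- cons x onto the first group ([[x]] if empty)
def pvConsHead (x : String) : List (List String) → List (List String)
  | [] => [[x]]
  | g :: gs => (x :: g) :: gs

-- the runs of lines, a fence line starting its run; always nonempty
def pvGroups : List String → List (List String)
  | [] => [[]]
  | l :: rest =>
    if pvFence l then [] :: pvConsHead l (pvGroups rest) else pvConsHead l (pvGroups rest)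

-- prepend buf to the first group
def pvPre (buf : List String) : List (List String) → List (List String)
  | [] => [buf]
  | g :: gs => (buf ++ g) :: gs

-- tag groups with alternating flags starting at f, joining each
def pvAlt (f : Bool) : List (List String) → List (Bool × String)
  | [] => []
  | g :: gs => (f, PySem.Str.join "\n" g) :: pvAlt (!f) gs

-- tag groups with the parity of a running index k
def pvAltN (k : Nat) : List (List String) → List (Bool × String)
  | [] => []
  | g :: gs => (decide (k % 2 = 1), PySem.Str.join "\n" g) :: pvAltN (k + 1) gs

-- fence-line indices of ls, counting from i
def pvBoundsFrom : List String → Nat → List Nat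
  | [], _ => []
  | l :: rest, i =>
    if pvFence l then i :: pvBoundsFrom rest (i + 1) else pvBoundsFrom rest (i + 1)

-- the slices lines[s:b0], lines[b0:b1], …, lines[b_last:]
def pvSegs (lines : List String) : List Nat → Nat → List (List String)
  | [], s => [lines.drop s]
  | b :: bs, s => ((lines.drop s).take (b - s)) :: pvSegs lines bs b

theorem pvPre_consHead (buf : List String) (l : String) (gs : List (List String)) :
    pvPre buf (pvConsHead l gs) = pvPre (buf ++ [l]) gs := by
  cases gs <;> simp [pvPre, pvConsHead]

theorem pvPre_singleton (l : String) (gs : List (List String)) :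
    pvPre [l] gs = pvConsHead l gs := by
  cases gs <;> simp [pvPre, pvConsHead]

theorem pvALoop_eq (ls : List String) :
    ∀ (out : List (Bool × String)) (f : Bool) (buf : List String),
    pvALoop ls out f buf = out ++ pvAlt f (pvPre buf (pvGroups ls)) := by
  induction ls with
  | nil => intro out f buf; simp [pvALoop, pvGroups, pvPre, pvAlt]
  | cons l rest ih =>
    intro out f buf
    cases h : pvFence l
    · simp [pvALoop, pvGroups, h, ih, pvPre_consHead]
    · have hrec := ih (out ++ [(f, PySem.Str.join "\n" buf)]) (!f) [l]
      simp only [pvALoop, h, if_true, hrec, pvPre_singleton, pvGroups]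
      simp [pvPre, pvAlt]

theorem pvGroups_ne_nil (ls : List String) : pvGroups ls ≠ [] := by
  cases ls with
  | nil => simp [pvGroups]
  | cons l rest =>
    unfold pvGroups
    cases hg : pvGroups rest <;> cases pvFence l <;> simp [pvConsHead]

theorem pvPre_nil (gs : List (List String)) (h : gs ≠ []) : pvPre [] gs = gs := by
  cases gs with
  | nil => exact absurd rfl h
  | cons g gs => simp [pvPre]

theorem pvBoundsFrom_succ (ls : List String) :
    ∀ i, pvBoundsFrom ls (i + 1) = (pvBoundsFrom ls i).map (· + 1) := by
  induction ls with
  | nil => intro i; simp [pvBoundsFrom]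
  | cons l rest ih =>
    intro i
    cases h : pvFence l <;> simp [pvBoundsFrom, h, ih]

theorem pvSegs_shift (l : String) (rest : List String) (bs : List Nat) :
    ∀ s, pvSegs (l :: rest) (bs.map (· + 1)) (s + 1) = pvSegs rest bs s := by
  induction bs with
  | nil => intro s; simp [pvSegs]
  | cons b bs ih =>
    intro s
    simp only [List.map_cons, pvSegs, List.drop_succ_cons, Nat.succ_sub_succ]
    rw [ih]

theorem pvSegs_cons (l : String) (rest : List String) (bs : List Nat) :
    pvSegs (l :: rest) (bs.map (· + 1)) 0 = pvConsHead l (pvSegs rest bs 0) := by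
  cases bs with
  | nil => simp [pvSegs, pvConsHead]
  | cons b bs =>
    simp only [List.map_cons, pvSegs, List.drop_zero, Nat.sub_zero]
    rw [pvSegs_shift]
    simp [pvConsHead, List.take_succ_cons]

theorem pvSegs_bounds_eq_groups (ls : List String) :
    pvSegs ls (pvBoundsFrom ls 0) 0 = pvGroups ls := by
  induction ls with
  | nil => simp [pvSegs, pvBoundsFrom, pvGroups]
  | cons l rest ih =>
    have hb : pvBoundsFrom rest 1 = (pvBoundsFrom rest 0).map (· + 1) :=
      pvBoundsFrom_succ rest 0
    cases h : pvFence l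
    · simp only [pvBoundsFrom, h, Bool.false_eq_true, if_false, zero_add, hb, pvGroups]
      rw [pvSegs_cons, ih]
    · simp only [pvBoundsFrom, h, if_true, zero_add, hb, pvGroups, pvSegs]
      rw [pvSegs_cons, ih]
      simp

theorem pvAltN_eq_pvAlt (gs : List (List String)) :
    ∀ k, pvAltN k gs = pvAlt (decide (k % 2 = 1)) gs := by
  induction gs with
  | nil => intro k; simp [pvAltN, pvAlt]
  | cons g gs ih =>
    intro k
    simp only [pvAltN, pvAlt, ih (k + 1)]
    congr 2
    rcases Nat.mod_two_eq_zero_or_one k with h | h <;>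
      simp [Nat.add_mod, h]

-- bool(k % 2) for a nonnegative k, as the port computes it
theorem pvModBool (k : Nat) :
    (PySem.Int.mod (k : Int) 2 == 1) = decide (k % 2 = 1) := by
  have h2 : (2 : Int) = ((2 : Nat) : Int) := by norm_num
  rw [h2, PySem.Int.mod_natCast]
  rcases Nat.mod_two_eq_zero_or_one k with h | h <;> simp [h]

-- the bounds computed by the port equal pvBoundsFrom, cast to Int
theorem pvBounds_int (ls : List String) :
    ∀ i : Nat,
    (PySem.List.enumerate ls (i : Int)).filterMap
        (fun p => if pvFence p.2 then some p.1 else none)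
    = (pvBoundsFrom ls i).map (fun n : Nat => (n : Int)) := by
  induction ls with
  | nil => intro i; simp [PySem.List.enumerate_nil, pvBoundsFrom]
  | cons l rest ih =>
    intro i
    rw [PySem.List.enumerate_cons]
    have hc : ((i : Int) + 1) = ((i + 1 : Nat) : Int) := by push_cast; ring
    have h1 := ih (i + 1)
    rw [← hc] at h1
    cases h : pvFence l <;>
      simp [pvBoundsFrom, h, h1]

-- the zip/enumerate/map expression of the port equals pvAltN over pvSegs
theorem pvZip_eq (lines : List String) (bs : List Nat) :
    ∀ (s k : Nat),
    (PySem.List.enumerate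
        (((s : Int) :: bs.map (fun n : Nat => (n : Int))).zip
          (bs.map (fun n : Nat => (n : Int)) ++ [(lines.length : Int)])) (k : Int)).map
      (fun q => (PySem.Int.mod q.1 2 == 1,
                 PySem.Str.join "\n" (PySem.List.slice lines (some q.2.1) (some q.2.2))))
    = pvAltN k (pvSegs lines bs s) := by
  induction bs with
  | nil =>
    intro s k
    simp only [List.map_nil, List.nil_append, List.zip_cons_cons, List.zip_nil_left,
      PySem.List.enumerate_cons, PySem.List.enumerate_nil, List.map_cons, List.map_nil,
      pvSegs, pvAltN]
    rw [PySem.List.slice_natCast, pvModBool]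
    have hlen : (lines.drop s).length ≤ lines.length - s := by simp
    rw [List.take_of_length_le hlen]
  | cons b bs ih =>
    intro s k
    simp only [List.map_cons, List.cons_append, List.zip_cons_cons,
      PySem.List.enumerate_cons, List.map_cons, pvSegs, pvAltN]
    rw [PySem.List.slice_natCast, pvModBool]
    have hc : ((k : Int) + 1) = ((k + 1 : Nat) : Int) := by push_cast; ring
    rw [hc, ih b (k + 1)]

-- B's chunk list, characterised through pvGroups
theorem pvChunksB_eq (lines : List String) :
    pvChunksB lines = pvAlt false (pvGroups lines) := by
  unfold pvChunksB pvBoundsB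
  have hb := pvBounds_int lines 0
  simp only [Nat.cast_zero] at hb
  rw [hb]
  have hz := pvZip_eq lines (pvBoundsFrom lines 0) 0 0
  simp only [Nat.cast_zero] at hz
  rw [hz, pvSegs_bounds_eq_groups, pvAltN_eq_pvAlt]
  simp

-- ===== VERDICT (by name: the statement is the Claim_ definition above) =====
theorem split_at_fences_py_spec : Claim_equal_split_at_fences_py := by
  intro text _
  unfold Spec_split_at_fences_py split_at_fences_py split_at_fences_py_alt
  rw [pvALoop_eq, pvPre_nil _ (pvGroups_ne_nil _), pvChunksB_eq]
  simp
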